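-- pv_equiv track=rewrite | github.com/plut0nium/AdventOfCode | 2019/16/day_16.py | FFT_optimized
-- ===== SOURCE A (Python) =====
-- def FFT_optimized(signal, phases):
--     input_signal = [x for x in signal]
--     for p in range(phases):
--         output = [0] * len(signal)
--         output[-1] = input_signal[-1]
--         for s in range(len(signal)-2, -1, -1):
--             output[s] = input_signal[s] + output[s+1]
--             output[s] %= 10
--         input_signal = [x for x in output]
--     return output
-- ===== SOURCE B (Python) =====
-- def FFT_optimized(input_signal, phases):
--     output = list(input_signal)
--     for p in range(phases):
--         last = output[-1]
--         total = sum(output)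
--         running = 0
--         new = []
--         for x in output[:-1]:
--             new.append((total - running) % 10)
--             running += x
--         new.append(last)
--         output = new
--     return output
-- ===== Notes on version B (the rewrite author's own statement) =====
-- stated objective: alternative
-- what changed: Each phase's backward suffix-sum accumulator (preallocated output written right-to-left) is replaced by a forward left-to-right pass that precomputes the total and maintains a running prefix sum, emitting (total - running) % 10 and appending the untouched last element.
-- crash fix: When phases <= 0 A raises UnboundLocalError (the loop never binds output) while B returns the signal unchanged. — e.g. on FFT_optimized([1, 2], 0): A raises UnboundLocalError, B returns [1, 2]
import Mathlib
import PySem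

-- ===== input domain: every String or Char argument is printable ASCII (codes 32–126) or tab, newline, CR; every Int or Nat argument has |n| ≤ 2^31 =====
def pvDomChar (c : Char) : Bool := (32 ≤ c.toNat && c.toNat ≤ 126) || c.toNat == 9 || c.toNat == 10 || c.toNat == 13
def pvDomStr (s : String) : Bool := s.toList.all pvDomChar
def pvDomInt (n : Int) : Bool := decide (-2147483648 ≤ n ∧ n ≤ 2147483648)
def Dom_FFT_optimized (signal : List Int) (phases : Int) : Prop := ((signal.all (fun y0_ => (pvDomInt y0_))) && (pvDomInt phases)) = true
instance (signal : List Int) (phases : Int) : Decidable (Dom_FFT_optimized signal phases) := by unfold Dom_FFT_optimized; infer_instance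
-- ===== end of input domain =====

-- B replaces A's backward suffix-sum accumulation by a forward pass maintaining a total and a
-- running prefix sum (alternative decomposition, same O(n·phases) cost); return-value equivalence.

-- ===== PORT A =====
-- inner loop 'for s in range(len(signal)-2, -1, -1)': structural count-down recursion,
-- the call with k+1 performs the body at index s = k, so the initial call k = n-1 visits n-2, …, 0.
def pvAInner (input : List Int) : List Int → Nat → List Int
  | out, 0 => out
  | out, k + 1 =>
      -- output[s] = input_signal[s] + output[s+1]; output[s] %= 10   (s always in range under Pre_)
      pvAInner input (out.set k (PySem.Int.mod (input.getD k 0 + out.getD (k + 1) 0) 10)) k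

-- one phase body: output = [0]*len(signal); output[-1] = input_signal[-1]; inner loop
def pvPhaseA (n : Nat) (input : List Int) : List Int :=
  pvAInner input ((List.replicate n (0 : Int)).set (n - 1) (PySem.List.pyGetD input (-1) 0)) (n - 1)

def FFT_optimized (signal : List Int) (phases : Int) : List Int :=
  -- input_signal = [x for x in signal]; each phase ends with input_signal = [x for x in output],
  -- so the fold state is input_signal and the returned 'output' is the final state (phases ≥ 1 under Pre_).
  (PySem.List.pyRange 0 phases 1).foldl (fun input _ => pvPhaseA signal.length input) (signal.map (fun x => x))

-- ===== PORT B =====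
-- one phase: last = output[-1]; total = sum(output); forward loop over output[:-1]
-- appending (total - running) % 10 and advancing running; then append last.
-- last = output[-1]; total = sum(output) (inlined); st = (new, running) after the forward loop
def pvPhaseB (output : List Int) : List Int :=
  ((PySem.List.slice output none (some (-1))).foldl
      (fun (st : List Int × Int) x => (st.1 ++ [PySem.Int.mod (output.sum - st.2) 10], st.2 + x)) ([], 0)).1
    ++ [PySem.List.pyGetD output (-1) 0]

def FFT_optimized_alt (signal : List Int) (phases : Int) : List Int :=
  -- output = list(signal); for p in range(phases): output = one phase; return output
  (PySem.List.pyRange 0 phases 1).foldl (fun output _ => pvPhaseB output) signal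

-- ===== PRECONDITION & SPEC =====
-- Pre_ excludes exactly where A raises: empty signal (IndexError at output[-1]) and phases ≤ 0
-- (the loop never runs and the returned 'output' is unbound: UnboundLocalError).
def Pre_FFT_optimized (signal : List Int) (phases : Int) : Prop := signal ≠ [] ∧ 1 ≤ phases
instance (signal : List Int) (phases : Int) : Decidable (Pre_FFT_optimized signal phases) := by unfold Pre_FFT_optimized; infer_instance
def pvWitness_FFT_optimized : List Int × Int := ([1, 2, 3], 2)

-- When phases ≤ 0, A raises UnboundLocalError while B returns the signal unchanged.
def Raises_FFT_optimized (signal : List Int) (phases : Int) : Prop := phases ≤ 0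
instance (signal : List Int) (phases : Int) : Decidable (Raises_FFT_optimized signal phases) := by unfold Raises_FFT_optimized; infer_instance
def pvRaiseWitness_FFT_optimized : List Int × Int := ([1, 2], 0)
def pvRaiseWitnessOut_FFT_optimized : List Int := [1, 2]

def Spec_FFT_optimized (signal : List Int) (phases : Int) (out : List Int) : Prop := out = FFT_optimized_alt signal phases
instance (signal : List Int) (phases : Int) (out : List Int) : Decidable (Spec_FFT_optimized signal phases out) := by unfold Spec_FFT_optimized; infer_instance

-- ===== CLAIM (what is proved, stated in full; the proofs are below) =====
def Claim_equal_FFT_optimized : Prop := ∀ (signal : List Int) (phases : Int), Dom_FFT_optimized signal phases → Pre_FFT_optimized signal phases → Spec_FFT_optimized signal phases (FFT_optimized signal phases)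
def Claim_raises_FFT_optimized : Prop := (∀ (signal : List Int) (phases : Int), Dom_FFT_optimized signal phases → Raises_FFT_optimized signal phases → ¬ Pre_FFT_optimized signal phases) ∧ (Dom_FFT_optimized (pvRaiseWitness_FFT_optimized.1) (pvRaiseWitness_FFT_optimized.2) ∧ Raises_FFT_optimized (pvRaiseWitness_FFT_optimized.1) (pvRaiseWitness_FFT_optimized.2) ∧ FFT_optimized_alt (pvRaiseWitness_FFT_optimized.1) (pvRaiseWitness_FFT_optimized.2) = pvRaiseWitnessOut_FFT_optimized)

-- ===== LEMMAS AND PROOFS =====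

-- the common value of one phase, described pointwise: last element kept verbatim,
-- every other position j gets (sum of the suffix from j) mod 10
def pvTgt (input : List Int) (j : Nat) : Int :=
  if j = input.length - 1 then input.getD j 0 else ((input.drop j).sum) % 10

def pvTgtList (input : List Int) : List Int := (List.range input.length).map (pvTgt input)

theorem pvTgtList_length (input : List Int) : (pvTgtList input).length = input.length := by
  simp [pvTgtList]

theorem pvTgt_mod (input : List Int) (j : Nat) (hj : j < input.length) :
    pvTgt input j % 10 = ((input.drop j).sum) % 10 := by
  unfold pvTgt
  split_ifs with h
  · subst h
    rw [List.drop_eq_getElem_cons (by omega)]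
    have : input.drop (input.length - 1 + 1) = [] := List.drop_eq_nil_of_le (by omega)
    simp [this, List.getD_eq_getElem?_getD, List.getElem?_eq_getElem (by omega)]
  · exact Int.emod_emod_of_dvd _ (by norm_num)

theorem pvAInner_inv (input : List Int) (k : Nat) :
    ∀ out : List Int, out.length = input.length → k + 1 ≤ input.length →
    (∀ j, k ≤ j → j < input.length → out.getD j 0 = pvTgt input j) →
    (pvAInner input out k).length = input.length ∧
      ∀ j, j < input.length → (pvAInner input out k).getD j 0 = pvTgt input j := by
  induction k with
  | zero =>
      intro out hlen _ hout
      exact ⟨hlen, fun j hj => hout j (Nat.zero_le j) hj⟩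
  | succ k ih =>
      intro out hlen hk hout
      have hkn : k < input.length := by omega
      have hk1 : k + 1 < input.length := by omega
      simp only [pvAInner]
      apply ih
      · simpa using hlen
      · omega
      · intro j hkj hjn
        rcases Nat.eq_or_lt_of_le hkj with rfl | hjgt
        · -- j = k: the freshly written entry
          have hset : ((out.set k (PySem.Int.mod (input.getD k 0 + out.getD (k + 1) 0) 10)).getD k 0)
              = PySem.Int.mod (input.getD k 0 + out.getD (k + 1) 0) 10 := by
            rw [List.getD_eq_getElem?_getD, List.getElem?_set_self (by omega)]
            simp
          rw [hset, hout (k + 1) (by omega) hk1]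
          rw [PySem.Int.mod_eq_emod_of_pos (by norm_num)]
          have hdrop : (input.drop k).sum = input.getD k 0 + (input.drop (k + 1)).sum := by
            conv_lhs => rw [List.drop_eq_getElem_cons hkn]
            rw [List.sum_cons, List.getD_eq_getElem?_getD, List.getElem?_eq_getElem hkn,
              Option.getD_some]
          have hmod := pvTgt_mod input (k + 1) hk1
          have hne : k ≠ input.length - 1 := by omega
          have htk : pvTgt input k = (input.drop k).sum % 10 := by
            unfold pvTgt; rw [if_neg hne]
          rw [htk, hdrop]
          omega
        · -- j > k: untouched entry
          rw [List.getD_eq_getElem?_getD, List.getElem?_set_ne (by omega),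
            ← List.getD_eq_getElem?_getD]
          exact hout j (by omega) hjn

theorem pvPhaseA_eq_tgt (input : List Int) (h : input ≠ []) :
    pvPhaseA input.length input = pvTgtList input := by
  have hn : 1 ≤ input.length := List.length_pos_iff.mpr h
  unfold pvPhaseA
  have hinit := pvAInner_inv input (input.length - 1)
      ((List.replicate input.length (0 : Int)).set (input.length - 1) (PySem.List.pyGetD input (-1) 0))
      (by simp) (by omega) ?_
  · rcases hinit with ⟨hlen, hpt⟩
    apply List.ext_getElem
    · rw [hlen, pvTgtList_length]
    · intro i h1 h2
      have hi : i < input.length := by omega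
      have := hpt i hi
      rw [List.getD_eq_getElem?_getD, List.getElem?_eq_getElem h1] at this
      simp only [Option.getD_some] at this
      rw [this]
      simp [pvTgtList, List.getElem_map]
  · intro j hj hjn
    have hje : j = input.length - 1 := by omega
    subst hje
    rw [List.getD_eq_getElem?_getD, List.getElem?_set_self (by simp; omega)]
    simp only [Option.getD_some]
    rw [PySem.List.pyGetD_neg_one input 0 h]
    unfold pvTgt
    simp [List.getLast_eq_getElem, List.getD_eq_getElem?_getD,
      List.getElem?_eq_getElem (show input.length - 1 < input.length by omega)]

-- B's forward fold, characterised: starting from (pre, r) over ys it appends, for each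
-- position j of ys, (total - (r + sum of the first j elements of ys)) % 10
theorem pvBFold (total : Int) (ys : List Int) :
    ∀ (pre : List Int) (r : Int),
      ys.foldl (fun (st : List Int × Int) x => (st.1 ++ [PySem.Int.mod (total - st.2) 10], st.2 + x)) (pre, r)
        = (pre ++ (List.range ys.length).map (fun j => PySem.Int.mod (total - (r + (ys.take j).sum)) 10),
           r + ys.sum) := by
  induction ys with
  | nil => intro pre r; simp
  | cons x t ih =>
      intro pre r
      simp only [List.foldl_cons, ih]
      rw [Prod.mk.injEq]
      constructor
      · simp only [List.length_cons]
        rw [List.range_succ_eq_map]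
        simp [List.append_assoc, Function.comp_def, add_assoc, List.take_succ_cons,
          List.sum_cons]
      · simp only [List.sum_cons]; ring

theorem pvPhaseB_eq_tgt (input : List Int) (h : input ≠ []) :
    pvPhaseB input = pvTgtList input := by
  have hn : 1 ≤ input.length := List.length_pos_iff.mpr h
  have hdl : input.dropLast.length = input.length - 1 := by simp
  unfold pvPhaseB
  rw [PySem.List.slice_to_neg_one, pvBFold, PySem.List.pyGetD_neg_one input 0 h]
  simp only [List.nil_append, hdl]
  have hr : pvTgtList input
      = (List.range (input.length - 1)).map (pvTgt input) ++ [pvTgt input (input.length - 1)] := by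
    unfold pvTgtList
    have hsucc : input.length = (input.length - 1) + 1 := by omega
    rw [hsucc, List.range_succ, List.map_append]
    simp
  rw [hr]
  congr 1
  · apply List.map_congr_left
    intro j hj
    rw [List.mem_range] at hj
    have htake : input.dropLast.take j = input.take j := by
      rw [List.dropLast_eq_take, List.take_take]
      congr 1; omega
    rw [htake, PySem.Int.mod_eq_emod_of_pos (by norm_num)]
    have hsplit : (input.take j).sum + (input.drop j).sum = input.sum := by
      rw [← List.sum_append, List.take_append_drop]
    unfold pvTgt
    have hne : j ≠ input.length - 1 := by omega
    simp only [hne, if_false]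
    have hsub : input.sum - (0 + (input.take j).sum) = (input.drop j).sum := by omega
    rw [hsub]
  · unfold pvTgt
    simp [List.getLast_eq_getElem, List.getD_eq_getElem?_getD,
      List.getElem?_eq_getElem (show input.length - 1 < input.length by omega)]

theorem pvPhase_eq (l : List Int) (n : Nat) (hl : l.length = n) (hn : 1 ≤ n) :
    pvPhaseA n l = pvPhaseB l := by
  have h : l ≠ [] := by intro he; subst he; simp at hl; omega
  rw [← hl, pvPhaseA_eq_tgt l h, pvPhaseB_eq_tgt l h]

theorem pvPhaseB_length (l : List Int) (h : l ≠ []) : (pvPhaseB l).length = l.length := by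
  rw [pvPhaseB_eq_tgt l h, pvTgtList_length]

theorem pvFold_congr (n : Nat) (hn : 1 ≤ n) (r : List Int) :
    ∀ l : List Int, l.length = n →
      r.foldl (fun input _ => pvPhaseA n input) l = r.foldl (fun output _ => pvPhaseB output) l := by
  induction r with
  | nil => intro l _; rfl
  | cons x t ih =>
      intro l hl
      have h : l ≠ [] := by intro he; subst he; simp at hl; omega
      simp only [List.foldl_cons]
      rw [pvPhase_eq l n hl hn]
      exact ih (pvPhaseB l) (by rw [pvPhaseB_length l h, hl])

-- ===== VERDICT (by name: the statement is the Claim_ definition above) =====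
theorem FFT_optimized_spec : Claim_equal_FFT_optimized := by
  intro signal phases _ hpre
  rcases hpre with ⟨hne, _⟩
  unfold Spec_FFT_optimized FFT_optimized FFT_optimized_alt
  rw [List.map_id']
  exact pvFold_congr signal.length (List.length_pos_iff.mpr hne) _ signal rfl

@[simp] theorem FFT_optimized_raises : Claim_raises_FFT_optimized := by
  unfold Claim_raises_FFT_optimized
  constructor
  · intro signal phases _ hr hpre
    unfold Raises_FFT_optimized at hr
    unfold Pre_FFT_optimized at hpre
    omega
  · exact ⟨by decide, by decide, by decide⟩
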